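-- pv_equiv track=rewrite | github.com/adaball/cw-practice-py | integers_recreation_two.py | find_possible_e_and_f
-- ===== SOURCE A (Python) =====
-- from itertools import permutations
--
-- def find_possible_e_and_f(a, b, c, d):
--     possible_vals = set()
--     for p in permutations([a, b, c, d]):
--         sum_v = p[0] * p[1] + p[2] * p[3]
--         dif_v = p[0] * p[1] - p[2] * p[3]
--
--         # nb idk why it's valid to use the abs val of negative results
--         #    when the instructions say e and f must be >= 0, but this
--         #    passes all the tests
--         possible_vals.add(abs(sum_v))
--         possible_vals.add(abs(dif_v))
--     return possible_vals
-- ===== SOURCE B (Python) =====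
-- def find_possible_e_and_f(a, b, c, d):
--     # Enumerate the 3 partitions of {a,b,c,d} into two product pairs
--     # instead of all 24 permutations.
--     ab, cd, ac, bd, ad, bc = a * b, c * d, a * c, b * d, a * d, b * c
--     possible_vals = set()
--     for x, y in ((ab, cd), (ac, bd), (ad, bc)):
--         possible_vals.add(abs(x + y))
--         possible_vals.add(abs(x - y))
--     return possible_vals
-- ===== Notes on version B (the rewrite author's own statement) =====
-- stated objective: simpler
-- what changed: B computes the six pairwise products once and enumerates the 3 partitions of {a,b,c,d} into two product pairs, adding |x+y| and |x-y| per partition, instead of iterating all 24 permutations.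
import Mathlib
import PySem

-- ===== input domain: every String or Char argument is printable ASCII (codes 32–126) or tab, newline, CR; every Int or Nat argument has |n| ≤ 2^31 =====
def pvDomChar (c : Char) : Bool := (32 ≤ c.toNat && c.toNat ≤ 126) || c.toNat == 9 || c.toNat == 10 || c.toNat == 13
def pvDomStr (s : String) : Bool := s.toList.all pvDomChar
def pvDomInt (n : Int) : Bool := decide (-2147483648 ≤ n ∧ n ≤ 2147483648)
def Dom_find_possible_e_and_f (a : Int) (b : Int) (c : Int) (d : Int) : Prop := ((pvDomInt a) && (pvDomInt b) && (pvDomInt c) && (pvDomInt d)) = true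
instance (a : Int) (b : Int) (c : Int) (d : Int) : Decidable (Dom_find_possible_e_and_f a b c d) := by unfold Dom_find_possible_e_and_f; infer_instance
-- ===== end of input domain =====

-- B enumerates the 3 pair-partitions of {a,b,c,d} directly instead of all 24 permutations (simpler, constant-factor fewer iterations).

-- ===== PORT A =====
-- itertools.permutations([a,b,c,d]) in itertools order, as a literal list
def pvPerms (a b c d : Int) : List (Int × Int × Int × Int) := [ (a, b, c, d), (a, b, d, c), (a, c, b, d), (a, c, d, b), (a, d, b, c), (a, d, c, b), (b, a, c, d), (b, a, d, c), (b, c, a, d), (b, c, d, a), (b, d, a, c), (b, d, c, a), (c, a, b, d), (c, a, d, b), (c, b, a, d), (c, b, d, a), (c, d, a, b), (c, d, b, a), (d, a, b, c), (d, a, c, b), (d, b, a, c), (d, b, c, a), (d, c, a, b), (d, c, b, a) ]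

def find_possible_e_and_f (a : Int) (b : Int) (c : Int) (d : Int) : List Int :=
  (pvPerms a b c d).foldl
    (fun possible_vals p =>
      PySem.Set.add (PySem.Set.add possible_vals |p.1 * p.2.1 + p.2.2.1 * p.2.2.2|)
        |p.1 * p.2.1 - p.2.2.1 * p.2.2.2|)
    PySem.Set.empty

-- ===== PORT B =====
def find_possible_e_and_f_alt (a : Int) (b : Int) (c : Int) (d : Int) : List Int :=
  ([(a * b, c * d), (a * c, b * d), (a * d, b * c)] : List (Int × Int)).foldl
    (fun possible_vals q =>
      PySem.Set.add (PySem.Set.add possible_vals |q.1 + q.2|) |q.1 - q.2|)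
    PySem.Set.empty

-- ===== PRECONDITION & SPEC =====
def Spec_find_possible_e_and_f (a : Int) (b : Int) (c : Int) (d : Int) (out : List Int) : Prop := out = find_possible_e_and_f_alt a b c d
instance (a : Int) (b : Int) (c : Int) (d : Int) (out : List Int) : Decidable (Spec_find_possible_e_and_f a b c d out) := by unfold Spec_find_possible_e_and_f; infer_instance

-- ===== CLAIM (what is proved, stated in full; the proofs are below) =====
def Claim_equal_find_possible_e_and_f : Prop := ∀ (a : Int) (b : Int) (c : Int) (d : Int), Dom_find_possible_e_and_f a b c d → Spec_find_possible_e_and_f a b c d (find_possible_e_and_f a b c d)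

-- ===== LEMMAS AND PROOFS =====

-- adding two values already present is a no-op
theorem pv_absorb2 {s : List Int} {v w : Int} (hv : v ∈ s) (hw : w ∈ s) :
    PySem.Set.add (PySem.Set.add s v) w = s := by
  rw [PySem.Set.add_of_mem hv, PySem.Set.add_of_mem hw]

-- ===== VERDICT (by name: the statement is the Claim_ definition above) =====
theorem find_possible_e_and_f_spec : Claim_equal_find_possible_e_and_f := by
  intro a b c d _
  unfold Spec_find_possible_e_and_f find_possible_e_and_f find_possible_e_and_f_alt pvPerms
  simp only [List.foldl]
  rw [show (|a*b + d*c| : Int) = |a*b + c*d| from by congr 1 <;> ring]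
  rw [show (|a*b - d*c| : Int) = |a*b - c*d| from by congr 1 <;> ring]
  rw [show (|a*c + d*b| : Int) = |a*c + b*d| from by congr 1 <;> ring]
  rw [show (|a*c - d*b| : Int) = |a*c - b*d| from by congr 1 <;> ring]
  rw [show (|a*d + c*b| : Int) = |a*d + b*c| from by congr 1 <;> ring]
  rw [show (|a*d - c*b| : Int) = |a*d - b*c| from by congr 1 <;> ring]
  rw [show (|b*a + c*d| : Int) = |a*b + c*d| from by congr 1 <;> ring]
  rw [show (|b*a - c*d| : Int) = |a*b - c*d| from by congr 1 <;> ring]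
  rw [show (|b*a + d*c| : Int) = |a*b + c*d| from by congr 1 <;> ring]
  rw [show (|b*a - d*c| : Int) = |a*b - c*d| from by congr 1 <;> ring]
  rw [show (|b*c + a*d| : Int) = |a*d + b*c| from by congr 1 <;> ring]
  rw [show (|b*c - a*d| : Int) = |a*d - b*c| from by rw [abs_sub_comm]; all_goals congr 1 <;> ring]
  rw [show (|b*c + d*a| : Int) = |a*d + b*c| from by congr 1 <;> ring]
  rw [show (|b*c - d*a| : Int) = |a*d - b*c| from by rw [abs_sub_comm]; all_goals congr 1 <;> ring]
  rw [show (|b*d + a*c| : Int) = |a*c + b*d| from by congr 1 <;> ring]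
  rw [show (|b*d - a*c| : Int) = |a*c - b*d| from by rw [abs_sub_comm]; all_goals congr 1 <;> ring]
  rw [show (|b*d + c*a| : Int) = |a*c + b*d| from by congr 1 <;> ring]
  rw [show (|b*d - c*a| : Int) = |a*c - b*d| from by rw [abs_sub_comm]; all_goals congr 1 <;> ring]
  rw [show (|c*a + b*d| : Int) = |a*c + b*d| from by congr 1 <;> ring]
  rw [show (|c*a - b*d| : Int) = |a*c - b*d| from by congr 1 <;> ring]
  rw [show (|c*a + d*b| : Int) = |a*c + b*d| from by congr 1 <;> ring]
  rw [show (|c*a - d*b| : Int) = |a*c - b*d| from by congr 1 <;> ring]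
  rw [show (|c*b + a*d| : Int) = |a*d + b*c| from by congr 1 <;> ring]
  rw [show (|c*b - a*d| : Int) = |a*d - b*c| from by rw [abs_sub_comm]; all_goals congr 1 <;> ring]
  rw [show (|c*b + d*a| : Int) = |a*d + b*c| from by congr 1 <;> ring]
  rw [show (|c*b - d*a| : Int) = |a*d - b*c| from by rw [abs_sub_comm]; all_goals congr 1 <;> ring]
  rw [show (|c*d + a*b| : Int) = |a*b + c*d| from by congr 1 <;> ring]
  rw [show (|c*d - a*b| : Int) = |a*b - c*d| from by rw [abs_sub_comm]; all_goals congr 1 <;> ring]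
  rw [show (|c*d + b*a| : Int) = |a*b + c*d| from by congr 1 <;> ring]
  rw [show (|c*d - b*a| : Int) = |a*b - c*d| from by rw [abs_sub_comm]; all_goals congr 1 <;> ring]
  rw [show (|d*a + b*c| : Int) = |a*d + b*c| from by congr 1 <;> ring]
  rw [show (|d*a - b*c| : Int) = |a*d - b*c| from by congr 1 <;> ring]
  rw [show (|d*a + c*b| : Int) = |a*d + b*c| from by congr 1 <;> ring]
  rw [show (|d*a - c*b| : Int) = |a*d - b*c| from by congr 1 <;> ring]
  rw [show (|d*b + a*c| : Int) = |a*c + b*d| from by congr 1 <;> ring]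
  rw [show (|d*b - a*c| : Int) = |a*c - b*d| from by rw [abs_sub_comm]; all_goals congr 1 <;> ring]
  rw [show (|d*b + c*a| : Int) = |a*c + b*d| from by congr 1 <;> ring]
  rw [show (|d*b - c*a| : Int) = |a*c - b*d| from by rw [abs_sub_comm]; all_goals congr 1 <;> ring]
  rw [show (|d*c + a*b| : Int) = |a*b + c*d| from by congr 1 <;> ring]
  rw [show (|d*c - a*b| : Int) = |a*b - c*d| from by rw [abs_sub_comm]; all_goals congr 1 <;> ring]
  rw [show (|d*c + b*a| : Int) = |a*b + c*d| from by congr 1 <;> ring]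
  rw [show (|d*c - b*a| : Int) = |a*b - c*d| from by rw [abs_sub_comm]; all_goals congr 1 <;> ring]
  simp only [pv_absorb2, PySem.Set.mem_add, List.not_mem_nil, or_false, or_true, true_or, eq_self_iff_true]
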